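-- pv_equiv track=rewrite | github.com/Bradleyfc/CFBC | fix_password_hashes_safe.py | analizar_hash_seguro
-- ===== SOURCE A (Python) =====
-- def analizar_hash_seguro(password_hash):
--     """Analiza el formato de un hash de contraseña sin usar validadores de Django"""
--     if not password_hash:
--         return "vacío", 0, []
--
--     if not isinstance(password_hash, str):
--         return "no_string", 0, []
--
--     # Verificar si parece un hash
--     algoritmos_conocidos = ['pbkdf2_sha256', 'pbkdf2_sha1', 'bcrypt', 'argon2', 'sha1', 'md5']
--
--     es_hash = False
--     algoritmo = "desconocido"
--
--     for alg in algoritmos_conocidos: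
--         if password_hash.startswith(alg + '$'):
--             es_hash = True
--             algoritmo = alg
--             break
--
--     if not es_hash:
--         # Podría ser texto plano o hash sin prefijo conocido
--         if len(password_hash) < 20:
--             return "posible_texto_plano", 0, []
--         else:
--             return "hash_desconocido", 0, []
--
--     # Dividir por $ para contar partes
--     partes = password_hash.split('$')
--     return algoritmo, len(partes), partes
-- ===== SOURCE B (Python) =====
-- def analizar_hash_seguro(password_hash):
--     """Analiza el formato de un hash de contraseña: tokeniza por '$' y clasifica por la primera parte."""
--     if not password_hash:
--         return "vacío", 0, []
--
--     if not isinstance(password_hash, str):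
--         return "no_string", 0, []
--
--     algoritmos_conocidos = {'pbkdf2_sha256', 'pbkdf2_sha1', 'bcrypt', 'argon2', 'sha1', 'md5'}
--
--     partes = password_hash.split('$')
--     if len(partes) > 1 and partes[0] in algoritmos_conocidos:
--         return partes[0], len(partes), partes
--
--     if len(password_hash) < 20:
--         return "posible_texto_plano", 0, []
--     return "hash_desconocido", 0, []
-- ===== Notes on version B (the rewrite author's own statement) =====
-- stated objective: alternative
-- what changed: B tokenizes once with split('$') and classifies by whether the first token is a known algorithm name (with more than one token), instead of A's loop of six startswith(alg + '$') prefix tests followed by a separate split.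
import Mathlib
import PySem

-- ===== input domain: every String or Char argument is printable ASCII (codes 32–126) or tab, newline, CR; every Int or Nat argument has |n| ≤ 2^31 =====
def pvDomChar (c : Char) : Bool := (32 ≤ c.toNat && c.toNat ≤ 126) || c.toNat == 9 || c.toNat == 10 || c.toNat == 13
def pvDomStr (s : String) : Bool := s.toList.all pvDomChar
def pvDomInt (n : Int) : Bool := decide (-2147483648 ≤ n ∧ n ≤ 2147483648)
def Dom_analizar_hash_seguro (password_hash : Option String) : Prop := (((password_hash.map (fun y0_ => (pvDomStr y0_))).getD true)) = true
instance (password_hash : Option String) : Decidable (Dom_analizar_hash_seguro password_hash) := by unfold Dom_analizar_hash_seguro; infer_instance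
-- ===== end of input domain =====

-- B tokenizes once with split('$') and classifies by the first token being a known algorithm
-- name (with more than one token), instead of A's loop of six startswith(alg+'$') tests; same cost.

-- ===== PORT A =====
-- A's list of known algorithm names (as char lists; Python compares str, exact on ASCII).
def pvAlgosA : List (List Char) :=
  ["pbkdf2_sha256".toList, "pbkdf2_sha1".toList, "bcrypt".toList, "argon2".toList,
   "sha1".toList, "md5".toList]

-- A's for-loop with break: the first alg with password_hash.startswith(alg + '$'),
-- none if the loop leaves es_hash = False.
def pvFindAlg : List (List Char) → List Char → Option (List Char)
  | [], _ => none
  | alg :: rest, cs =>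
    if PySem.Chars.startswith cs (alg ++ ['$']) then some alg else pvFindAlg rest cs

def analizar_hash_seguro (password_hash : Option String) : String × Int × List String :=
  match password_hash with
  | none => ("vacío", 0, [])     -- 'not password_hash' is true for None
  | some s =>
    let cs := s.toList
    if cs.isEmpty then ("vacío", 0, [])   -- and for the empty string
    else
      -- isinstance(password_hash, str) always holds for a String argument
      match pvFindAlg pvAlgosA cs with
      | none =>
        if cs.length < 20 then ("posible_texto_plano", 0, [])
        else ("hash_desconocido", 0, [])
      | some alg =>
        let partes := (PySem.Chars.splitOn cs ['$']).map String.ofList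
        (String.ofList alg, (partes.length : Int), partes)

-- ===== PORT B =====
-- B's set literal of known algorithm names.
def pvAlgoSet : PySem.Set (List Char) :=
  PySem.Set.ofList
    ["pbkdf2_sha256".toList, "pbkdf2_sha1".toList, "bcrypt".toList, "argon2".toList,
     "sha1".toList, "md5".toList]

def analizar_hash_seguro_alt (password_hash : Option String) : String × Int × List String :=
  match password_hash with
  | none => ("vacío", 0, [])
  | some s =>
    let cs := s.toList
    if cs.isEmpty then ("vacío", 0, [])
    else
      let partesC := PySem.Chars.splitOn cs ['$']
      if 1 < partesC.length ∧ pvAlgoSet.contains (partesC.getD 0 []) = true then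
        (String.ofList (partesC.getD 0 []), (partesC.length : Int),
         partesC.map String.ofList)
      else if cs.length < 20 then ("posible_texto_plano", 0, [])
      else ("hash_desconocido", 0, [])

-- ===== PRECONDITION & SPEC =====
def Spec_analizar_hash_seguro (password_hash : Option String) (out : String × Int × List String) : Prop := out = analizar_hash_seguro_alt password_hash
instance (password_hash : Option String) (out : String × Int × List String) : Decidable (Spec_analizar_hash_seguro password_hash out) := by unfold Spec_analizar_hash_seguro; infer_instance

-- ===== CLAIM (what is proved, stated in full; the proofs are below) =====
def Claim_equal_analizar_hash_seguro : Prop := ∀ (password_hash : Option String), Dom_analizar_hash_seguro password_hash → Spec_analizar_hash_seguro password_hash (analizar_hash_seguro password_hash)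

-- ===== LEMMAS AND PROOFS =====

-- A structural model of str.split('$') used only in the proofs.
def pvSplit : List Char → List (List Char)
  | [] => [[]]
  | c :: rest => if c = '$' then [] :: pvSplit rest else (pvSplit rest).modifyHead (c :: ·)

theorem pvSplit_ne_nil (cs : List Char) : pvSplit cs ≠ [] := by
  induction cs with
  | nil => simp [pvSplit]
  | cons c rest ih =>
    simp only [pvSplit]
    split_ifs
    · simp
    · cases h : pvSplit rest with
      | nil => exact absurd h ih
      | cons a t => simp [List.modifyHead]

theorem splitOn_go_eq (cs : List Char) : ∀ (fuel : Nat) (cur : List Char) (acc : List (List Char)),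
    cs.length ≤ fuel →
    PySem.Chars.splitOn.go ['$'] fuel cs cur acc
      = acc.reverse ++ (pvSplit cs).modifyHead (cur.reverse ++ ·) := by
  induction cs with
  | nil =>
    intro fuel cur acc _
    cases fuel <;> simp [PySem.Chars.splitOn.go, pvSplit, List.modifyHead]
  | cons c rest ih =>
    intro fuel cur acc hlen
    cases fuel with
    | zero => simp at hlen
    | succ fuel =>
      by_cases hc : c = '$'
      · subst hc
        have h1 : PySem.Chars.splitOn.go ['$'] (fuel+1) ('$' :: rest) cur acc
            = PySem.Chars.splitOn.go ['$'] fuel rest [] (cur.reverse :: acc) := by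
          simp [PySem.Chars.splitOn.go, List.isPrefixOf]
        rw [h1, ih fuel [] (cur.reverse :: acc) (by simpa using Nat.lt_succ_iff.mp (by simpa using hlen))]
        cases hpr : pvSplit rest <;> simp [pvSplit, List.modifyHead, hpr]
      · have h1 : PySem.Chars.splitOn.go ['$'] (fuel+1) (c :: rest) cur acc
            = PySem.Chars.splitOn.go ['$'] fuel rest (c :: cur) acc := by
          simp [PySem.Chars.splitOn.go, List.isPrefixOf, Ne.symm hc]
        rw [h1, ih fuel (c :: cur) acc (by simpa using Nat.lt_succ_iff.mp (by simpa using hlen))]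
        cases h : pvSplit rest with
        | nil => exact absurd h (pvSplit_ne_nil rest)
        | cons a t => simp [pvSplit, hc, h, List.modifyHead]

theorem splitOn_eq_pvSplit (cs : List Char) :
    PySem.Chars.splitOn cs ['$'] = pvSplit cs := by
  have h := splitOn_go_eq cs (cs.length + 1) [] [] (by omega)
  cases hp : pvSplit cs with
  | nil => exact absurd hp (pvSplit_ne_nil cs)
  | cons a t =>
    simpa [PySem.Chars.splitOn, hp, List.modifyHead] using h

-- The key bridge: a startswith(alg + '$') test is exactly "first '$'-token = alg and
-- there is more than one token", for alg not containing '$'.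
theorem startswith_iff_pvSplit (alg : List Char) (hd : '$' ∉ alg) : ∀ cs : List Char,
    (PySem.Chars.startswith cs (alg ++ ['$']) = true ↔
      ∃ t, pvSplit cs = alg :: t ∧ t ≠ []) := by
  induction alg with
  | nil =>
    intro cs
    cases cs with
    | nil => simp [PySem.Chars.startswith, pvSplit]
    | cons c rest =>
      by_cases hc : c = '$'
      · subst hc
        simp [PySem.Chars.startswith, List.isPrefixOf, pvSplit, pvSplit_ne_nil rest]
      · cases h : pvSplit rest with
        | nil => exact absurd h (pvSplit_ne_nil rest)
        | cons a t =>
          simp [PySem.Chars.startswith, List.isPrefixOf, pvSplit, hc, h, List.modifyHead,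
            Ne.symm hc]
  | cons a alg' ih =>
    intro cs
    have ha : a ≠ '$' := fun h => hd (h ▸ List.mem_cons_self)
    have ih' := ih (fun h => hd (List.mem_cons_of_mem a h))
    cases cs with
    | nil => simp [PySem.Chars.startswith, pvSplit]
    | cons c rest =>
      by_cases hc : c = '$'
      · subst hc
        simp [PySem.Chars.startswith, List.isPrefixOf, pvSplit, ha]
      · cases h : pvSplit rest with
        | nil => exact absurd h (pvSplit_ne_nil rest)
        | cons b t =>
          have hrest : (PySem.Chars.startswith rest (alg' ++ ['$']) = true) ↔ (b = alg' ∧ t ≠ []) := by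
            rw [ih' rest]
            constructor
            · rintro ⟨u, hu, hune⟩
              rw [h] at hu
              obtain ⟨h1, h2⟩ := List.cons.inj hu
              exact ⟨h1, h2 ▸ hune⟩
            · rintro ⟨h1, h2⟩
              exact ⟨t, by rw [h, h1], h2⟩
          have hsplit : pvSplit (c :: rest) = (c :: b) :: t := by
            simp [pvSplit, hc, h, List.modifyHead]
          constructor
          · intro hpre
            have hpre' : a = c ∧ PySem.Chars.startswith rest (alg' ++ ['$']) = true := by
              simpa [PySem.Chars.startswith, List.isPrefixOf] using hpre
            obtain ⟨hac, hr⟩ := hpre'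
            obtain ⟨hb, ht⟩ := hrest.mp hr
            exact ⟨t, by rw [hsplit, hac, hb], ht⟩
          · rintro ⟨t', ht', htne⟩
            rw [hsplit] at ht'
            obtain ⟨hcb, htt⟩ := List.cons.inj ht'
            obtain ⟨hca2, hb⟩ := List.cons.inj hcb
            have hr := hrest.mpr ⟨hb, htt ▸ htne⟩
            simpa [PySem.Chars.startswith, List.isPrefixOf, hca2] using hr

-- A's loop, characterised through the token view.
theorem pvFindAlg_eq (names : List (List Char)) (hn : ∀ a ∈ names, '$' ∉ a)
    (cs h : List Char) (t : List (List Char)) (hs : pvSplit cs = h :: t) :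
    pvFindAlg names cs = if t ≠ [] ∧ h ∈ names then some h else none := by
  induction names with
  | nil => simp [pvFindAlg]
  | cons alg rest ih =>
    have halg : '$' ∉ alg := hn alg List.mem_cons_self
    have hrest : ∀ a ∈ rest, '$' ∉ a := fun a ha => hn a (List.mem_cons_of_mem alg ha)
    simp only [pvFindAlg]
    by_cases hsw : PySem.Chars.startswith cs (alg ++ ['$']) = true
    · obtain ⟨t', ht', htne⟩ := (startswith_iff_pvSplit alg halg cs).mp hsw
      rw [hs] at ht'
      obtain ⟨hh, htt⟩ := List.cons.inj ht'
      rw [if_pos hsw, if_pos ⟨htt ▸ htne, by simp [hh]⟩, hh]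
    · rw [if_neg hsw, ih hrest]
      have hno : ¬(t ≠ [] ∧ h = alg) := by
        rintro ⟨htne, hh⟩
        exact hsw ((startswith_iff_pvSplit alg halg cs).mpr ⟨t, by rw [hs, hh], htne⟩)
      by_cases htne : t = [] <;> by_cases hmem : h ∈ rest <;>
        simp_all [List.mem_cons]

-- ===== VERDICT (by name: the statement is the Claim_ definition above) =====
theorem analizar_hash_seguro_spec : Claim_equal_analizar_hash_seguro := by
  intro password_hash _
  unfold Spec_analizar_hash_seguro
  cases password_hash with
  | none => rfl
  | some s =>
    show analizar_hash_seguro (some s) = analizar_hash_seguro_alt (some s)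
    rw [analizar_hash_seguro, analizar_hash_seguro_alt]
    by_cases he : s.toList.isEmpty = true
    · rw [if_pos he, if_pos he]
    · rw [if_neg he, if_neg he]
      cases hp : pvSplit s.toList with
      | nil => exact absurd hp (pvSplit_ne_nil s.toList)
      | cons h t =>
        have hnames : ∀ a ∈ pvAlgosA, '$' ∉ a := by decide
        have hfind := pvFindAlg_eq pvAlgosA hnames s.toList h t hp
        have hsplit : PySem.Chars.splitOn s.toList ['$'] = h :: t :=
          (splitOn_eq_pvSplit s.toList).trans hp
        have hsetiff : pvAlgoSet.contains h = true ↔ h ∈ pvAlgosA := by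
          simp [pvAlgoSet, pvAlgosA, PySem.Set.ofList, PySem.Set.contains]
        rw [hfind, hsplit]
        by_cases hc : t ≠ [] ∧ h ∈ pvAlgosA
        · have hcond : 1 < (h :: t).length ∧ pvAlgoSet.contains ((h :: t).getD 0 []) = true := by
            refine ⟨?_, by simpa [List.getD] using hsetiff.mpr hc.2⟩
            cases t with
            | nil => exact absurd rfl hc.1
            | cons _ _ => simp
          rw [if_pos hc, if_pos hcond]
          simp [List.getD]
        · have hcond : ¬(1 < (h :: t).length ∧ pvAlgoSet.contains ((h :: t).getD 0 []) = true) := by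
            rintro ⟨hlen, hmem⟩
            apply hc
            refine ⟨?_, hsetiff.mp (by simpa [List.getD] using hmem)⟩
            cases t with
            | nil => simp at hlen
            | cons _ _ => simp
          rw [if_neg hc, if_neg hcond]
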